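-- pv_equiv track=rewrite | github.com/pypi-data/pypi-mirror-402 | packages/mastui/mastui-1.7.0-py3-none-any.whl/mastui/autocomplete.py | location_from_index
-- ===== SOURCE A (Python) =====
-- def location_from_index(text: str, index: int) -> tuple[int, int]:
--     """Convert absolute index back to (row, col)."""
--     if index < 0:
--         return (0, 0)
--     lines = text.split("\n")
--     remaining = index
--     for row, line in enumerate(lines):
--         if remaining <= len(line):
--             return (row, remaining)
--         remaining -= len(line) + 1
--     # If index beyond text, clamp to end
--     if lines:
--         return (len(lines) - 1, len(lines[-1]))
--     return (0, 0)
-- ===== SOURCE B (Python) =====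
-- def location_from_index(text: str, index: int) -> tuple[int, int]:
--     """Convert absolute index back to (row, col)."""
--     if index < 0:
--         return (0, 0)
--     row, col = 0, 0
--     for ch in text[:index]:
--         if ch == "\n":
--             row, col = row + 1, 0
--         else:
--             col += 1
--     return (row, col)
-- ===== Notes on version B (the rewrite author's own statement) =====
-- stated objective: simpler
-- what changed: Replaces the line-splitting plus decrementing loop over lines (with a clamp-to-end fallback) by a single character scan over the sliced prefix text[:index] that counts newlines and the column directly.
import Mathlib
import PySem

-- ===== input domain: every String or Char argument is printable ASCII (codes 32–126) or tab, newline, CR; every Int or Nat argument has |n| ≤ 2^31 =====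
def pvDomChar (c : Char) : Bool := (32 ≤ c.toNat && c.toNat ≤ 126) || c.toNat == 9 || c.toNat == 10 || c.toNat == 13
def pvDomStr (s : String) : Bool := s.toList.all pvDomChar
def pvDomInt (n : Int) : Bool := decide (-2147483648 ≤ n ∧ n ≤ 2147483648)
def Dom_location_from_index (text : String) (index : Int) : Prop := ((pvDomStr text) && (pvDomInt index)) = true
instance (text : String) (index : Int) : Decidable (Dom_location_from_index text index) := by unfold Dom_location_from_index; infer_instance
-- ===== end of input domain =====

-- B replaces A's line-splitting + decrementing loop over lines by a single character
-- scan of the prefix text[:index]; equally O(n), simpler.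

-- ===== PORT A =====
-- the 'for row, line in enumerate(lines)' loop with its early return
def locAGo : List (List Char) → Int → Int → Option (Int × Int)
  | [], _, _ => none
  | line :: rest, row, remaining =>
    if remaining ≤ (line.length : Int) then some (row, remaining)
    else locAGo rest (row + 1) (remaining - (line.length : Int) - 1)

def location_from_index (text : String) (index : Int) : Int × Int :=
  if index < 0 then (0, 0)
  else
    let lines := PySem.Chars.splitOn text.toList ['\n']
    match locAGo lines 0 index with
    | some p => p
    | none =>
      if lines ≠ [] then
        (((lines.length : Int)) - 1, ((PySem.List.pyGetD lines (-1) []).length : Int))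
      else (0, 0)

-- ===== PORT B =====
-- the body of B's 'for ch in text[:index]' loop
def bstep (rc : Int × Int) (ch : Char) : Int × Int :=
  if ch = '\n' then (rc.1 + 1, 0) else (rc.1, rc.2 + 1)

def location_from_index_alt (text : String) (index : Int) : Int × Int :=
  if index < 0 then (0, 0)
  else (PySem.Chars.slice text.toList none (some index)).foldl bstep (0, 0)

-- ===== PRECONDITION & SPEC =====
def Spec_location_from_index (text : String) (index : Int) (out : Int × Int) : Prop := out = location_from_index_alt text index
instance (text : String) (index : Int) (out : Int × Int) : Decidable (Spec_location_from_index text index out) := by unfold Spec_location_from_index; infer_instance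

-- ===== CLAIM (what is proved, stated in full; the proofs are below) =====
def Claim_equal_location_from_index : Prop := ∀ (text : String) (index : Int), Dom_location_from_index text index → Spec_location_from_index text index (location_from_index text index)

-- ===== LEMMAS AND PROOFS =====

-- simple recursive characterisation of text.split('\n')
def splitNl : List Char → List (List Char)
  | [] => [[]]
  | c :: rest => if c = '\n' then [] :: splitNl rest else (splitNl rest).modifyHead (c :: ·)

theorem splitNl_ne_nil (cs : List Char) : splitNl cs ≠ [] := by
  induction cs with
  | nil => simp [splitNl]
  | cons c rest ih =>
    simp only [splitNl]
    split
    · simp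
    · cases h : splitNl rest with
      | nil => exact absurd h ih
      | cons a t => simp

theorem splitOn_go_nl (fuel : Nat) (l cur : List Char) (acc : List (List Char))
    (h : l.length ≤ fuel) :
    PySem.Chars.splitOn.go ['\n'] fuel l cur acc
      = acc.reverse ++ (splitNl l).modifyHead (cur.reverse ++ ·) := by
  induction fuel generalizing l cur acc with
  | zero =>
    cases l with
    | nil => simp [PySem.Chars.splitOn.go, splitNl]
    | cons c rest => simp at h
  | succ f ih =>
    cases l with
    | nil => simp [PySem.Chars.splitOn.go, splitNl]
    | cons c rest =>
      by_cases hc : c = '\n'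
      · subst hc
        rw [show PySem.Chars.splitOn.go ['\n'] (f+1) ('\n'::rest) cur acc
              = PySem.Chars.splitOn.go ['\n'] f rest [] (cur.reverse :: acc) by
            simp [PySem.Chars.splitOn.go, List.isPrefixOf]]
        rw [ih rest [] (cur.reverse :: acc) (by simpa using Nat.le_of_succ_le_succ h)]
        cases hs : splitNl rest with
        | nil => exact absurd hs (splitNl_ne_nil rest)
        | cons a t => simp [splitNl, hs]
      · rw [show PySem.Chars.splitOn.go ['\n'] (f+1) (c::rest) cur acc
              = PySem.Chars.splitOn.go ['\n'] f rest (c :: cur) acc by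
            simp only [PySem.Chars.splitOn.go, List.isPrefixOf, Bool.and_eq_true, beq_iff_eq]
            rw [if_neg (by simp [Ne.symm hc])]]
        rw [ih rest (c :: cur) acc (by simpa using Nat.le_of_succ_le_succ h)]
        cases hs : splitNl rest with
        | nil => exact absurd hs (splitNl_ne_nil rest)
        | cons a t => simp [splitNl, hs, hc]

theorem splitOn_nl (cs : List Char) :
    PySem.Chars.splitOn cs ['\n'] = splitNl cs := by
  rw [PySem.Chars.splitOn, splitOn_go_nl _ _ _ _ (by omega)]
  cases hs : splitNl cs with
  | nil => exact absurd hs (splitNl_ne_nil cs)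
  | cons a t => simp

theorem splitNl_no_nl (cs : List Char) (h : '\n' ∉ cs) : splitNl cs = [cs] := by
  induction cs with
  | nil => rfl
  | cons c rest ih =>
    simp only [List.mem_cons, not_or] at h
    simp [splitNl, Ne.symm h.1, ih h.2]

theorem splitNl_append (l rest : List Char) (h : '\n' ∉ l) :
    splitNl (l ++ '\n' :: rest) = l :: splitNl rest := by
  induction l with
  | nil => simp [splitNl]
  | cons c t ih =>
    simp only [List.mem_cons, not_or] at h
    simp only [List.cons_append, splitNl, if_neg (Ne.symm h.1 : ¬ c = '\n'), ih h.2]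
    cases hs : splitNl rest with
    | nil => exact absurd hs (splitNl_ne_nil rest)
    | cons a t' => simp

theorem exists_nl_split (cs : List Char) (h : '\n' ∈ cs) :
    ∃ l rest, cs = l ++ '\n' :: rest ∧ '\n' ∉ l := by
  induction cs with
  | nil => simp at h
  | cons c rest ih =>
    by_cases hc : c = '\n'
    · exact ⟨[], rest, by simp [hc], by simp⟩
    · obtain ⟨l, r, hr, hl⟩ := ih (by simpa [Ne.symm hc] using h)
      exact ⟨c :: l, r, by simp [hr], by simp [hl, Ne.symm hc]⟩

theorem bstep_nl (p : Int × Int) : bstep p '\n' = (p.1 + 1, 0) := by simp [bstep]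

theorem bstep_ne (p : Int × Int) (c : Char) (h : ¬ c = '\n') : bstep p c = (p.1, p.2 + 1) := by
  simp [bstep, h]

theorem foldl_bstep_shift (l : List Char) (a b : Int) :
    l.foldl bstep (a, b) = ((l.foldl bstep (0, b)).1 + a, (l.foldl bstep (0, b)).2) := by
  induction l generalizing a b with
  | nil => simp
  | cons c t ih =>
    by_cases hc : c = '\n'
    · subst hc
      simp only [List.foldl_cons, bstep_nl]
      rw [ih (a + 1) 0, ih (0 + 1) 0]
      simp
      omega
    · simp only [List.foldl_cons, bstep_ne _ _ hc]
      exact ih a (b + 1)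

theorem foldl_bstep_no_nl (l : List Char) (h : '\n' ∉ l) (a b : Int) :
    l.foldl bstep (a, b) = (a, b + l.length) := by
  induction l generalizing b with
  | nil => simp
  | cons c t ih =>
    simp only [List.mem_cons, not_or] at h
    simp only [List.foldl_cons, bstep_ne _ _ (fun hh => h.1 hh.symm)]
    rw [ih h.2 (b + 1)]
    simp; ring

theorem locAGo_shift (L : List (List Char)) (row r : Int) :
    locAGo L row r = (locAGo L 0 r).map (fun p => (p.1 + row, p.2)) := by
  induction L generalizing row r with
  | nil => rfl
  | cons line rest ih =>
    simp only [locAGo]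
    split
    · simp
    · rw [ih (row + 1), ih (0 + 1), Option.map_map]
      congr 1
      funext p; simp; ring

theorem pyGetD_neg_one_cons {α : Type} (x : α) (xs : List α) (d : α) (h : xs ≠ []) :
    PySem.List.pyGetD (x :: xs) (-1) d = PySem.List.pyGetD xs (-1) d := by
  simp only [PySem.List.pyGetD, PySem.List.pyGet?_neg_one]
  cases xs with
  | nil => exact absurd rfl h
  | cons y ys => rw [List.getLast?_cons_cons]

-- the A-shaped value after splitOn has been rewritten to splitNl
def avalOf (cs : List Char) (r : Int) : Int × Int :=
  match locAGo (splitNl cs) 0 r with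
  | some p => p
  | none =>
    if splitNl cs ≠ [] then
      (((splitNl cs).length : Int) - 1, ((PySem.List.pyGetD (splitNl cs) (-1) []).length : Int))
    else (0, 0)

theorem main_equiv (cs : List Char) (r : Int) (hr : 0 ≤ r) :
    avalOf cs r = (cs.take r.toNat).foldl bstep (0, 0) := by
  by_cases h : '\n' ∈ cs
  · obtain ⟨l, rest, hcs, hl⟩ := exists_nl_split cs h
    subst hcs
    by_cases hle : r ≤ (l.length : Int)
    · have htake : (l ++ '\n' :: rest).take r.toNat = l.take r.toNat := by
        rw [List.take_append, show r.toNat - l.length = 0 by omega,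
            List.take_zero, List.append_nil]
      rw [avalOf, splitNl_append l rest hl]
      simp only [locAGo, if_pos hle]
      rw [htake, foldl_bstep_no_nl _ (fun hm => hl (List.mem_of_mem_take hm)) 0 0]
      simp [List.length_take]
      omega
    · push_neg at hle
      have hr' : 0 ≤ r - (l.length : Int) - 1 := by omega
      have htake : (l ++ '\n' :: rest).take r.toNat
          = l ++ '\n' :: rest.take (r - (l.length : Int) - 1).toNat := by
        rw [List.take_append, List.take_of_length_le (l := l) (by omega)]
        congr 1
        rw [show r.toNat - l.length = (r - (l.length : Int) - 1).toNat + 1 by omega,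
            List.take_succ_cons]
      have hIH := main_equiv rest (r - (l.length : Int) - 1) hr'
      rw [avalOf, splitNl_append l rest hl]
      simp only [locAGo, if_neg (not_le.mpr hle)]
      rw [locAGo_shift _ (0 + 1) (r - (l.length : Int) - 1)]
      rw [htake, List.foldl_append, foldl_bstep_no_nl l hl 0 0,
          List.foldl_cons, bstep_nl]
      rw [foldl_bstep_shift _ (0 + 1) 0, ← hIH]
      rw [avalOf]
      cases hA : locAGo (splitNl rest) 0 (r - (l.length : Int) - 1) with
      | some p => simp
      | none =>
        have hne := splitNl_ne_nil rest
        simp only [Option.map_none, if_pos hne, ne_eq]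
        rw [if_pos (by simp : (l :: splitNl rest) ≠ [])]
        rw [pyGetD_neg_one_cons _ _ _ hne]
        simp only [List.length_cons]
        rw [Prod.mk.injEq]
        exact ⟨by push_cast; ring, rfl⟩
  · rw [avalOf, splitNl_no_nl cs h]
    simp only [locAGo]
    by_cases hle : r ≤ (cs.length : Int)
    · rw [if_pos hle]
      rw [foldl_bstep_no_nl _ (fun hm => h (List.mem_of_mem_take hm)) 0 0]
      simp [List.length_take]
      omega
    · rw [if_neg hle]
      rw [List.take_of_length_le (by omega), foldl_bstep_no_nl _ h 0 0]
      simp [PySem.List.pyGetD, PySem.List.pyGet?_neg_one]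
termination_by cs.length

-- ===== VERDICT (by name: the statement is the Claim_ definition above) =====
theorem location_from_index_spec : Claim_equal_location_from_index := by
  intro text index _
  unfold Spec_location_from_index location_from_index location_from_index_alt
  by_cases hneg : index < 0
  · simp [hneg]
  · push_neg at hneg
    simp only [if_neg (not_lt.mpr hneg)]
    rw [splitOn_nl]
    have := main_equiv text.toList index hneg
    rw [avalOf] at this
    rw [this]
    congr 1
    rw [PySem.Chars.slice_eq_listSlice]
    exact (PySem.List.slice_to _ hneg).symm
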